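-- pv_equiv track=rewrite | github.com/GavrilovaAnastasia/System_analysys_lab | task4/task4.py | unique_nodes
-- ===== SOURCE A (Python) =====
-- def unique_nodes(graph):
--     res = []
--     for x in graph:
--         for i in x:
--             if i not in res:
--                 res.append(i)
--     res.sort()
--     return res
-- ===== SOURCE B (Python) =====
-- def unique_nodes(graph):
--     flat = [i for x in graph for i in x]
--     flat.sort()
--     out = []
--     for i in flat:
--         if not out or out[-1] != i:
--             out.append(i)
--     return out
-- ===== Notes on version B (the rewrite author's own statement) =====
-- stated objective: faster
-- what changed: Replaced A's dedup-by-membership-scan-then-sort (quadratic 'i not in res' inner scan) with flatten, sort once, then one linear pass dropping elements equal to the previously kept one.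
import Mathlib
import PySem

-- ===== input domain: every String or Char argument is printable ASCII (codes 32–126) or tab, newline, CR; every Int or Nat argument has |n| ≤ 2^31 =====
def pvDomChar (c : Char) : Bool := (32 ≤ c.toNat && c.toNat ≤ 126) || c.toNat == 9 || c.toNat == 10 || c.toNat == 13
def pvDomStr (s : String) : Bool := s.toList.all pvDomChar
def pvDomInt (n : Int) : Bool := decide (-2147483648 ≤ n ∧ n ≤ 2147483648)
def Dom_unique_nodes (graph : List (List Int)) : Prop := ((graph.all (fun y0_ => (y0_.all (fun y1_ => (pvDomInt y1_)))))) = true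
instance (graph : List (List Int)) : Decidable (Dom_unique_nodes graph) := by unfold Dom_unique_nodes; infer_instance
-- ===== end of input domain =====

-- B replaces A's dedup-by-membership-scan-then-sort with flatten + sort once + one linear
-- pass dropping elements equal to the previously kept one (objective: faster).

-- ===== PORT A =====
def unique_nodes (graph : List (List Int)) : List Int :=
  let res := graph.foldl (fun res x =>
    x.foldl (fun res i => if i ∈ res then res else res ++ [i]) res) []
  PySem.List.sorted res (fun v => v) false

-- ===== PORT B =====
def unique_nodes_alt (graph : List (List Int)) : List Int :=
  let flat := graph.flatMap (fun x => x)
  let flatS := PySem.List.sorted flat (fun v => v) false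
  flatS.foldl (fun out i => if out = [] ∨ out.getLast? ≠ some i then out ++ [i] else out) []

-- ===== PRECONDITION & SPEC =====
def Spec_unique_nodes (graph : List (List Int)) (out : List Int) : Prop := out = unique_nodes_alt graph
instance (graph : List (List Int)) (out : List Int) : Decidable (Spec_unique_nodes graph out) := by unfold Spec_unique_nodes; infer_instance

-- ===== CLAIM (what is proved, stated in full; the proofs are below) =====
def Claim_equal_unique_nodes : Prop := ∀ (graph : List (List Int)), Dom_unique_nodes graph → Spec_unique_nodes graph (unique_nodes graph)

-- ===== LEMMAS AND PROOFS =====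

-- A's nested loops = one pass over the flattening.
theorem foldl_nested_eq_flat (graph : List (List Int)) (f : List Int → Int → List Int)
    (init : List Int) :
    graph.foldl (fun res x => x.foldl f res) init = (graph.flatMap (fun x => x)).foldl f init := by
  induction graph generalizing init with
  | nil => rfl
  | cons x t ih => simp [List.flatMap_cons, List.foldl_append, ih]

-- A's dedup-keep-first accumulator: nodup and membership bookkeeping.
theorem dedupF_invariant (l acc : List Int) (hacc : acc.Nodup) :
    (l.foldl (fun res i => if i ∈ res then res else res ++ [i]) acc).Nodup ∧
    (∀ v : Int, v ∈ l.foldl (fun res i => if i ∈ res then res else res ++ [i]) acc ↔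
      v ∈ acc ∨ v ∈ l) := by
  induction l generalizing acc with
  | nil => simpa using hacc
  | cons i t ih =>
    by_cases h : i ∈ acc
    · have hstep := ih acc hacc
      simp only [List.foldl_cons, if_pos h]
      refine ⟨hstep.1, fun v => ?_⟩
      rw [hstep.2 v, List.mem_cons]
      constructor
      · rintro (hv | hv) <;> simp_all
      · rintro (hv | rfl | hv) <;> simp_all
    · have hacc' : (acc ++ [i]).Nodup := by
        refine List.Nodup.append hacc (List.nodup_singleton _) ?_
        intro a ha hb
        rw [List.mem_singleton] at hb
        subst hb
        exact h ha
      have hstep := ih (acc ++ [i]) hacc'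
      simp only [List.foldl_cons, if_neg h]
      refine ⟨hstep.1, fun v => ?_⟩
      rw [hstep.2 v, List.mem_append]
      simp only [List.mem_cons, List.not_mem_nil, or_false]
      tauto

-- In a strictly increasing list every element is ≤ the last one.
theorem le_getLast_of_pairwise_lt (acc : List Int) (m a : Int)
    (hp : acc.Pairwise (· < ·)) (hm : acc.getLast? = some m) (ha : a ∈ acc) : a ≤ m := by
  induction acc with
  | nil => simp at ha
  | cons x t ih =>
    rcases List.pairwise_cons.mp hp with ⟨hx, ht⟩
    cases t with
    | nil =>
      simp at hm ha
      omega
    | cons y u =>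
      rw [List.getLast?_cons_cons] at hm
      rcases List.mem_cons.mp ha with rfl | ha
      · have hmem : m ∈ y :: u := List.mem_of_getLast? hm
        exact le_of_lt (hx m hmem)
      · exact ih ht hm ha

-- B's adjacent-dedup pass: strictly increasing result, same members.
theorem adjDedup_invariant (l acc : List Int)
    (hl : l.Pairwise (fun a b => a ≤ b))
    (hacc : acc.Pairwise (· < ·))
    (hle : ∀ b ∈ l, ∀ a ∈ acc, a ≤ b) :
    (l.foldl (fun out i => if out = [] ∨ out.getLast? ≠ some i then out ++ [i] else out) acc).Pairwise (· < ·) ∧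
    (∀ v : Int, v ∈ l.foldl (fun out i => if out = [] ∨ out.getLast? ≠ some i then out ++ [i] else out) acc ↔
      v ∈ acc ∨ v ∈ l) := by
  induction l generalizing acc with
  | nil => simpa using hacc
  | cons i t ih =>
    rcases List.pairwise_cons.mp hl with ⟨hit, ht⟩
    by_cases h : acc = [] ∨ acc.getLast? ≠ some i
    · -- append i
      have hlt : ∀ a ∈ acc, a < i := by
        intro a ha
        rcases h with h | h
        · simp [h] at ha
        · cases hm : acc.getLast? with
          | none => simp [List.getLast?_eq_none_iff.mp hm] at ha
          | some m =>
            have ham : a ≤ m := le_getLast_of_pairwise_lt acc m a hacc hm ha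
            have hmi : m ≤ i := hle i (by simp) m (List.mem_of_getLast? hm)
            have : m ≠ i := by intro hmi'; exact h (by rw [hm, hmi'])
            omega
      have hacc' : (acc ++ [i]).Pairwise (· < ·) := by
        rw [List.pairwise_append]
        exact ⟨hacc, List.pairwise_singleton _ _, by simpa using hlt⟩
      have hle' : ∀ b ∈ t, ∀ a ∈ acc ++ [i], a ≤ b := by
        intro b hb a ha
        rcases List.mem_append.mp ha with ha | ha
        · exact le_trans (le_of_lt (hlt a ha)) (hit b hb)
        · rw [List.mem_singleton] at ha; subst ha; exact hit b hb
      have hstep := ih (acc ++ [i]) ht hacc' hle'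
      rw [List.foldl_cons, if_pos h]
      refine ⟨hstep.1, fun v => ?_⟩
      rw [hstep.2 v, List.mem_append]
      simp only [List.mem_cons, List.not_mem_nil, or_false]
      tauto
    · -- skip i: it is already the last kept element
      push Not at h
      have hi : i ∈ acc := by
        have := List.mem_of_getLast? h.2
        exact this
      have hle' : ∀ b ∈ t, ∀ a ∈ acc, a ≤ b := by
        intro b hb a ha
        exact le_trans (le_getLast_of_pairwise_lt acc i a hacc h.2 ha) (hit b hb)
      have hstep := ih acc ht hacc hle'
      rw [List.foldl_cons, if_neg (by push Not; exact h)]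
      refine ⟨hstep.1, fun v => ?_⟩
      rw [hstep.2 v, List.mem_cons]
      constructor
      · rintro (hv | hv) <;> tauto
      · rintro (hv | rfl | hv) <;> simp_all

-- ===== VERDICT (by name: the statement is the Claim_ definition above) =====
theorem unique_nodes_spec : Claim_equal_unique_nodes := by
  intro graph _
  unfold Spec_unique_nodes unique_nodes unique_nodes_alt
  rw [foldl_nested_eq_flat]
  have hDfacts := dedupF_invariant (graph.flatMap (fun x => x)) [] (by simp)
  have hSle : (PySem.List.sorted (graph.flatMap (fun x => x)) (fun v => v) false).Pairwise
      (fun a b => a ≤ b) := by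
    simpa using PySem.List.sorted_pairwise (xs := graph.flatMap (fun x => x)) (key := fun v => v)
  have hLfacts := adjDedup_invariant (PySem.List.sorted (graph.flatMap (fun x => x)) (fun v => v) false)
    [] hSle (by simp) (by simp)
  have hLnodup := hLfacts.1.imp (fun h => ne_of_lt h)
  have hperm : ((PySem.List.sorted (graph.flatMap (fun x => x)) (fun v => v) false).foldl
      (fun out i => if out = [] ∨ out.getLast? ≠ some i then out ++ [i] else out) []).Perm
      ((graph.flatMap (fun x => x)).foldl (fun res i => if i ∈ res then res else res ++ [i]) []) := by
    apply List.perm_of_nodup_nodup_toFinset_eq hLnodup hDfacts.1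
    ext v
    simp only [List.mem_toFinset, hLfacts.2 v, hDfacts.2 v, PySem.List.mem_sorted]
  exact PySem.List.sorted_eq_of_perm_of_pairwise_lt _ _ (fun v => v) hperm hLfacts.1
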